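-- pv_equiv track=rewrite | github.com/shuubhhsinghal56-pixel/bank-pdf-to-excel | tools/run_sample_suite.py | preview_from_full_text
-- ===== SOURCE A (Python) =====
-- from typing import Any, Dict, List, Tuple
--
-- def preview_from_full_text(full_text: str) -> str:
--     preview_pages: List[str] = []
--     current_page: List[str] = []
--     page_count = 0
--     for line in full_text.splitlines():
--         if line.startswith("--- PAGE "):
--             if current_page:
--                 preview_pages.append("\n".join(current_page))
--                 current_page = []
--                 page_count += 1
--             if page_count >= 2:
--                 break
--         current_page.append(line)
--     if current_page and page_count < 2:
--         preview_pages.append("\n".join(current_page))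
--     return "\n".join(preview_pages[:2])
-- ===== SOURCE B (Python) =====
-- def _page_block(ls):
--     out = []
--     for l in ls:
--         if l.startswith("--- PAGE "):
--             break
--         out.append(l)
--     return out
--
--
-- def preview_from_full_text(full_text: str) -> str:
--     lines = full_text.splitlines()
--     if not lines:
--         return ""
--     body1 = _page_block(lines[1:])
--     rest = lines[1 + len(body1):]
--     body2 = _page_block(rest[1:])
--     kept = lines[:1] + body1 + rest[:1] + body2
--     return "\n".join(kept)
-- ===== Notes on version B (the rewrite author's own statement) =====
-- stated objective: simpler
-- what changed: B replaces A's stateful accumulator loop (pages list, current page, page counter, break) by a direct decomposition: take the marker-free block after line 0, locate the next page marker, take its block, and join one flat slice of lines with a single newline join.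
import Mathlib
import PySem

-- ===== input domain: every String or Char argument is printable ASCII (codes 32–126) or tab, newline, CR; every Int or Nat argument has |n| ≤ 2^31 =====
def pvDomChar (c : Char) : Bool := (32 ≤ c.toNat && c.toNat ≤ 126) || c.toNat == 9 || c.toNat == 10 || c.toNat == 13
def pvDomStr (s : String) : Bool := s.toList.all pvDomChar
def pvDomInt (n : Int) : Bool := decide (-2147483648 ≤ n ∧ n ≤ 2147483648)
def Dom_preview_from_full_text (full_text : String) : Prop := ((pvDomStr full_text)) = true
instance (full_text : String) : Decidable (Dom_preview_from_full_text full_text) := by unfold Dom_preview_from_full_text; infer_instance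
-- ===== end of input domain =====

-- B replaces A's stateful accumulator loop (pages/current page/counter/break) by a direct
-- two-block decomposition and one flat join (objective: simpler; same O(n) cost).

-- ===== PORT A =====
-- the for-loop of A, carrying (preview_pages, current_page, page_count); the [] case also
-- performs the post-loop flush 'if current_page and page_count < 2'
def pvA_loop : List String → List String → List String → Nat → List String
  | [], preview_pages, current_page, page_count =>
      if current_page ≠ [] ∧ page_count < 2
      then preview_pages ++ [PySem.Str.join "\n" current_page] else preview_pages
  | line :: rest, preview_pages, current_page, page_count =>
      if PySem.Str.startswith line "--- PAGE " then
        let st := if current_page ≠ []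
          then (preview_pages ++ [PySem.Str.join "\n" current_page], ([] : List String), page_count + 1)
          else (preview_pages, current_page, page_count)
        if st.2.2 ≥ 2 then st.1   -- break (post-loop flush never fires here: cur = [] or pc ≥ 2)
        else pvA_loop rest st.1 (st.2.1 ++ [line]) st.2.2
      else pvA_loop rest preview_pages (current_page ++ [line]) page_count

def preview_from_full_text (full_text : String) : String :=
  PySem.Str.join "\n"
    (PySem.List.slice (pvA_loop (PySem.Str.splitlines full_text) [] [] 0) none (some 2))

-- ===== PORT B =====
-- _page_block: longest marker-free prefix
def pvB_block : List String → List String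
  | [] => []
  | l :: rest => if PySem.Str.startswith l "--- PAGE " then [] else l :: pvB_block rest

def preview_from_full_text_alt (full_text : String) : String :=
  let lines := PySem.Str.splitlines full_text
  if lines = [] then "" else
    let body1 := pvB_block (PySem.List.slice lines (some 1) none)
    let rest := PySem.List.slice lines (some (1 + (body1.length : Int))) none
    let body2 := pvB_block (PySem.List.slice rest (some 1) none)
    let kept := PySem.List.slice lines none (some 1) ++ body1 ++
                PySem.List.slice rest none (some 1) ++ body2
    PySem.Str.join "\n" kept

-- ===== PRECONDITION & SPEC =====
def Spec_preview_from_full_text (full_text : String) (out : String) : Prop := out = preview_from_full_text_alt full_text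
instance (full_text : String) (out : String) : Decidable (Spec_preview_from_full_text full_text out) := by unfold Spec_preview_from_full_text; infer_instance

-- ===== CLAIM (what is proved, stated in full; the proofs are below) =====
def Claim_equal_preview_from_full_text : Prop := ∀ (full_text : String), Dom_preview_from_full_text full_text → Spec_preview_from_full_text full_text (preview_from_full_text full_text)

-- ===== LEMMAS AND PROOFS =====

-- the suffix of ls starting at its first page marker ([] if none)
def pvDropM : List String → List String
  | [] => []
  | l :: rest => if PySem.Str.startswith l "--- PAGE " then l :: rest else pvDropM rest

lemma pvB_block_drop : ∀ ls : List String, ls.drop (pvB_block ls).length = pvDropM ls := by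
  intro ls
  induction ls with
  | nil => simp [pvB_block, pvDropM]
  | cons l rest ih =>
    by_cases h : PySem.Str.startswith l "--- PAGE " = true
    · simp at h; simp [pvB_block, pvDropM, h]
    · simp at h; simp [pvB_block, pvDropM, h, ih]

lemma pv_join_app (sep : List Char) :
    ∀ (l1 : List (List Char)), l1 ≠ [] → ∀ (l2 : List (List Char)), l2 ≠ [] →
      PySem.Chars.join sep (l1 ++ l2) =
        PySem.Chars.join sep l1 ++ sep ++ PySem.Chars.join sep l2 := by
  intro l1
  induction l1 with
  | nil => intro h; exact absurd rfl h
  | cons a l ih =>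
    intro _ l2 h2
    cases l with
    | nil =>
      cases l2 with
      | nil => exact absurd rfl h2
      | cons b m =>
        rw [List.singleton_append, PySem.Chars.join_cons_cons, PySem.Chars.join_singleton]
    | cons b m =>
      rw [List.cons_append, PySem.Chars.join_cons_cons]
      have hbm : (b :: m) ++ l2 = b :: (m ++ l2) := by simp
      rw [show (a :: ((b :: m) ++ l2)) = a :: b :: (m ++ l2) by simp] at *
      rw [show PySem.Chars.join sep (a :: b :: (m ++ l2)) =
            a ++ sep ++ PySem.Chars.join sep (b :: (m ++ l2)) from
          PySem.Chars.join_cons_cons sep a b (m ++ l2)]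
      rw [show (b :: (m ++ l2)) = (b :: m) ++ l2 by simp, ih (by simp) l2 h2]
      simp [List.append_assoc]

lemma pv_join_singleton (s : String) : PySem.Str.join "\n" [s] = s := by
  simp [PySem.Str.join, PySem.Chars.join_singleton]

lemma pv_join_pair (p q : List String) (hp : p ≠ []) (hq : q ≠ []) :
    PySem.Str.join "\n" [PySem.Str.join "\n" p, PySem.Str.join "\n" q] =
      PySem.Str.join "\n" (p ++ q) := by
  simp only [PySem.Str.join, List.map_cons, List.map_nil, String.toList_ofList]
  rw [PySem.Chars.join_cons_cons, PySem.Chars.join_singleton, List.map_append,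
    pv_join_app _ (p.map String.toList) (by simpa using hp) (q.map String.toList)
      (by simpa using hq)]

-- phase 2 of A's loop: one page already flushed (page_count = 1), current page nonempty
lemma pvA_loop_one (rest2 : List String) : ∀ (pages cur : List String), cur ≠ [] →
    pvA_loop rest2 pages cur 1 =
      pages ++ [PySem.Str.join "\n" (cur ++ pvB_block rest2)] := by
  induction rest2 with
  | nil => intro pages cur hc; simp [pvA_loop, pvB_block, hc]
  | cons l r ih =>
    intro pages cur hc
    by_cases h : PySem.Str.startswith l "--- PAGE " = true
    · simp at h; simp [pvA_loop, pvB_block, h, hc]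
    · simp at h
      rw [show pvA_loop (l :: r) pages cur 1 = pvA_loop r pages (cur ++ [l]) 1 by
        simp [pvA_loop, h]]
      rw [ih pages (cur ++ [l]) (by simp)]
      simp [pvB_block, h]

-- phase 1: nothing flushed yet (page_count = 0), current page nonempty
lemma pvA_loop_zero (tail : List String) : ∀ (pages cur : List String), cur ≠ [] →
    pvA_loop tail pages cur 0 =
      pages ++ [PySem.Str.join "\n" (cur ++ pvB_block tail)] ++
        (match pvDropM tail with
         | [] => []
         | m1 :: r2 => [PySem.Str.join "\n" (m1 :: pvB_block r2)]) := by
  induction tail with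
  | nil => intro pages cur hc; simp [pvA_loop, pvB_block, pvDropM, hc]
  | cons l r ih =>
    intro pages cur hc
    by_cases h : PySem.Str.startswith l "--- PAGE " = true
    · simp at h
      rw [show pvA_loop (l :: r) pages cur 0
            = pvA_loop r (pages ++ [PySem.Str.join "\n" cur]) ([] ++ [l]) 1 by
        simp [pvA_loop, h, hc]]
      rw [pvA_loop_one r (pages ++ [PySem.Str.join "\n" cur]) ([] ++ [l]) (by simp)]
      simp [pvB_block, pvDropM, h]
    · simp at h
      rw [show pvA_loop (l :: r) pages cur 0 = pvA_loop r pages (cur ++ [l]) 0 by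
        simp [pvA_loop, h]]
      rw [ih pages (cur ++ [l]) (by simp)]
      simp [pvB_block, pvDropM, h]

-- ===== VERDICT (by name: the statement is the Claim_ definition above) =====
theorem preview_from_full_text_spec : Claim_equal_preview_from_full_text := by
  intro full_text _
  unfold Spec_preview_from_full_text preview_from_full_text preview_from_full_text_alt
  cases hls : PySem.Str.splitlines full_text with
  | nil => simp [pvA_loop, PySem.List.slice, PySem.Str.join, PySem.Chars.join, List.intercalate]
  | cons l0 t =>
    -- the first line always ends up in current_page, marker or not
    have hstep : pvA_loop (l0 :: t) [] [] 0 = pvA_loop t [] [l0] 0 := by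
      by_cases h : PySem.Str.startswith l0 "--- PAGE " = true
      · simp at h; simp [pvA_loop, h]
      · simp at h; simp [pvA_loop, h]
    rw [hstep, pvA_loop_zero t [] [l0] (by simp)]
    have hdrop1 : PySem.List.slice (l0 :: t) (some 1) none = t := by
      rw [PySem.List.slice_from _ (by norm_num)]; rfl
    have hrest : PySem.List.slice (l0 :: t) (some (1 + ((pvB_block t).length : Int))) none
        = pvDropM t := by
      rw [PySem.List.slice_from _ (by positivity)]
      rw [show ((1 : Int) + ((pvB_block t).length : Int)).toNat
            = (pvB_block t).length + 1 by omega]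
      rw [List.drop_succ_cons]
      exact pvB_block_drop t
    cases hd : pvDropM t with
    | nil =>
      simp only [hd, hdrop1, hrest]
      rw [PySem.List.slice_to _ (by norm_num)]
      simp [pv_join_singleton, PySem.List.slice, pvB_block]
    | cons m1 r2 =>
      simp only [hd, hdrop1, hrest]
      rw [PySem.List.slice_to _ (by norm_num)]
      rw [show PySem.List.slice (m1 :: r2) (some 1) none = r2 by
        rw [PySem.List.slice_from _ (by norm_num)]; rfl]
      rw [show PySem.List.slice (m1 :: r2) none (some 1) = [m1] by
        rw [PySem.List.slice_to _ (by norm_num)]; rfl]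
      rw [if_neg (by simp)]
      rw [show PySem.List.slice (l0 :: t) none (some 1) = [l0] by
        rw [PySem.List.slice_to _ (by norm_num)]; rfl]
      simp only [List.nil_append]
      rw [show List.take (2 : Int).toNat ([PySem.Str.join "\n" ([l0] ++ pvB_block t)] ++
            [PySem.Str.join "\n" (m1 :: pvB_block r2)])
          = [PySem.Str.join "\n" ([l0] ++ pvB_block t),
             PySem.Str.join "\n" (m1 :: pvB_block r2)] by rfl]
      rw [pv_join_pair ([l0] ++ pvB_block t) (m1 :: pvB_block r2) (by simp) (by simp)]
      simp
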